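-- pv_equiv track=rewrite | github.com/anamanlab/lawglance | src/immcad_api/policy/document_compilation_validator.py | _is_monotonic_page_ranges
-- ===== SOURCE A (Python) =====
-- def _is_monotonic_page_ranges(page_ranges: tuple[tuple[int, int], ...]) -> bool:
--     if not page_ranges:
--         return True
--
--     expected_start = 1
--     for start_page, end_page in page_ranges:
--         if start_page != expected_start:
--             return False
--         if end_page < start_page:
--             return False
--         expected_start = end_page + 1
--     return True
-- ===== SOURCE B (Python) =====
-- def _is_monotonic_page_ranges(page_ranges: tuple[tuple[int, int], ...]) -> bool:
--     if not page_ranges: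
--         return True
--     return (
--         page_ranges[0][0] == 1
--         and all(end >= start for start, end in page_ranges)
--         and all(nxt[0] == cur[1] + 1 for cur, nxt in zip(page_ranges, page_ranges[1:]))
--     )
-- ===== Notes on version B (the rewrite author's own statement) =====
-- stated objective: simpler
-- what changed: Replaced the expected_start accumulator loop with three stateless local checks: first start is 1, every range has end >= start, and each adjacent pair satisfies next.start == prev.end + 1 (via zip with the tail).
import Mathlib
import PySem

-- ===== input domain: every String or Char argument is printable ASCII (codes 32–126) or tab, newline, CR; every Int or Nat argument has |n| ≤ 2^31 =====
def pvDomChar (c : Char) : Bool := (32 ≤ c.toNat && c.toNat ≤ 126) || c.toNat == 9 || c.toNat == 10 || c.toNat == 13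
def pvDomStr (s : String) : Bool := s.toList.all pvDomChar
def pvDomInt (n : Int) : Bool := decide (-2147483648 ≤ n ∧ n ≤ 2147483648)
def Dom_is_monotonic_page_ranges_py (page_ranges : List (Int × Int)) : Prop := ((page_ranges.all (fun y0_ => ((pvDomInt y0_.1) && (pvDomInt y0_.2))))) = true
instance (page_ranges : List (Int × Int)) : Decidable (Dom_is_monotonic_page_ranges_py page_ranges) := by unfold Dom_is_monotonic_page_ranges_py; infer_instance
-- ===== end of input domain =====

-- B replaces A's expected_start accumulator loop with three stateless checks (first start = 1, end >= start everywhere, adjacent ranges contiguous via zip with the tail); objective: simpler.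
-- ===== PORT A =====
-- loop of A: threads expected_start through the ranges
def pvLoopA : List (Int × Int) → Int → Bool
  | [], _ => true
  | (start_page, end_page) :: rest, expected_start =>
    if start_page ≠ expected_start then false
    else if end_page < start_page then false
    else pvLoopA rest (end_page + 1)

def is_monotonic_page_ranges_py (page_ranges : List (Int × Int)) : Bool :=
  if page_ranges.isEmpty then true
  else pvLoopA page_ranges 1

-- ===== PORT B =====
def is_monotonic_page_ranges_py_alt (page_ranges : List (Int × Int)) : Bool :=
  match page_ranges with
  | [] => true
  | (s0, _) :: _ =>
    decide (s0 = 1)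
      && page_ranges.all (fun p => decide (p.1 ≤ p.2))
      && (page_ranges.zip page_ranges.tail).all (fun q => decide (q.2.1 = q.1.2 + 1))

-- ===== PRECONDITION & SPEC =====
def Spec_is_monotonic_page_ranges_py (page_ranges : List (Int × Int)) (out : Bool) : Prop := out = is_monotonic_page_ranges_py_alt page_ranges
instance (page_ranges : List (Int × Int)) (out : Bool) : Decidable (Spec_is_monotonic_page_ranges_py page_ranges out) := by unfold Spec_is_monotonic_page_ranges_py; infer_instance

-- ===== CLAIM (what is proved, stated in full; the proofs are below) =====
def Claim_equal_is_monotonic_page_ranges_py : Prop := ∀ (page_ranges : List (Int × Int)), Dom_is_monotonic_page_ranges_py page_ranges → Spec_is_monotonic_page_ranges_py page_ranges (is_monotonic_page_ranges_py page_ranges)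

-- ===== LEMMAS AND PROOFS =====

-- ===== VERDICT (by name: the statement is the Claim_ definition above) =====
-- the loop of A equals B's three local checks, for any expected_start
theorem pvLoopA_eq (page_ranges : List (Int × Int)) (expected_start : Int) :
    pvLoopA page_ranges expected_start =
      (match page_ranges with
       | [] => true
       | (s0, _) :: _ =>
         decide (s0 = expected_start)
           && page_ranges.all (fun p => decide (p.1 ≤ p.2))
           && (page_ranges.zip page_ranges.tail).all (fun q => decide (q.2.1 = q.1.2 + 1))) := by
  induction page_ranges generalizing expected_start with
  | nil => rfl
  | cons hd tl ih =>
    obtain ⟨s, e⟩ := hd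
    rw [pvLoopA]
    cases tl with
    | nil =>
      by_cases h1 : s = expected_start <;> by_cases h2 : e < s <;> simp_all [pvLoopA]
    | cons hd2 tl2 =>
      rw [ih (e + 1)]
      obtain ⟨s2, e2⟩ := hd2
      simp only [List.tail_cons, List.zip_cons_cons, List.all_cons]
      by_cases h1 : s = expected_start <;> by_cases h2 : e < s <;>
        simp_all [Bool.and_assoc, Bool.and_left_comm] <;>
        first
        | omega
        | simp [not_lt.mpr h2]

theorem is_monotonic_page_ranges_py_spec : Claim_equal_is_monotonic_page_ranges_py := by
  intro page_ranges _
  unfold Spec_is_monotonic_page_ranges_py is_monotonic_page_ranges_py is_monotonic_page_ranges_py_alt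
  cases page_ranges with
  | nil => rfl
  | cons hd tl =>
    simp only [List.isEmpty_cons, if_neg Bool.false_ne_true, pvLoopA_eq]
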